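-- pv_equiv track=rewrite | github.com/khelwood/advent-of-code | 2016/rtg_11.py | legal
-- ===== SOURCE A (Python) =====
-- def legal(state):
--     lonely_chip_floors = set()
--     gen_floors = set()
--     for i in range(1, len(state), 2):
--         if state[i]!=state[i+1]:
--             lonely_chip_floors.add(state[i])
--         gen_floors.add(state[i+1])
--     return not (gen_floors & lonely_chip_floors)
-- ===== SOURCE B (Python) =====
-- def legal(state):
--     n = len(state)
--     for i in range(1, n, 2):
--         if state[i] != state[i + 1] and any(state[j] == state[i] for j in range(2, n, 2)):
--             return False
--     return True
-- ===== Notes on version B (the rewrite author's own statement) =====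
-- stated objective: alternative
-- what changed: A maintains two sets in one pass and intersects them at the end; B uses no set at all: for each chip that is not with its own generator it scans the generator positions directly (nested scan) and short-circuits with False on the first unshielded chip.
import Mathlib
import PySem

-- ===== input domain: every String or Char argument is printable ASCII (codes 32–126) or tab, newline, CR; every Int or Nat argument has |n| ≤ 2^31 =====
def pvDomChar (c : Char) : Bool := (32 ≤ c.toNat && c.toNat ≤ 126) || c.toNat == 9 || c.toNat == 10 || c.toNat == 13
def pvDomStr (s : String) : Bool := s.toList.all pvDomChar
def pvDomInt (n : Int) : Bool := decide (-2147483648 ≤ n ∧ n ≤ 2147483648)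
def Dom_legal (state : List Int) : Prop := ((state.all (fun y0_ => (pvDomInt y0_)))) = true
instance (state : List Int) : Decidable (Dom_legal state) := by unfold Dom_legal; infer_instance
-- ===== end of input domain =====

-- B drops A's two-set bookkeeping entirely: for each chip away from its generator it scans the
-- generator positions directly (nested scan, no set) and short-circuits; objective: alternative.


-- ===== PORT A =====
-- state[i] / state[i+1] are ported with pyGetD …​ 0; inside Pre_legal every index is in range,
-- so the default is never read (on even-length states Python raises IndexError — excluded by Pre_).
def legal (state : List Int) : Bool :=
  let p := (PySem.List.pyRange 1 (state.length : Int) 2).foldl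
    (fun (p : PySem.Set Int × PySem.Set Int) i =>
      let si := PySem.List.pyGetD state i 0
      let si1 := PySem.List.pyGetD state (i + 1) 0
      ((if si ≠ si1 then PySem.Set.add p.1 si else p.1), PySem.Set.add p.2 si1))
    (PySem.Set.empty, PySem.Set.empty)
  -- `not (gen_floors & lonely_chip_floors)`: truthiness of a set = nonempty
  (PySem.Set.inter p.2 p.1).isEmpty

-- ===== PORT B =====
-- the for loop with an early `return False` is `.all`; the inner `any(...)` generator is `.any`
def legal_alt (state : List Int) : Bool :=
  let n : Int := (state.length : Int)
  (PySem.List.pyRange 1 n 2).all (fun i =>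
    !(decide (PySem.List.pyGetD state i 0 ≠ PySem.List.pyGetD state (i + 1) 0) &&
      (PySem.List.pyRange 2 n 2).any (fun j =>
        PySem.List.pyGetD state j 0 == PySem.List.pyGetD state i 0)))

-- ===== PRECONDITION & SPEC =====
-- Pre_ excludes states of even nonzero length, on which A raises IndexError (state[i+1] past the end).
def Pre_legal (state : List Int) : Prop := state.length % 2 = 1 ∨ state = []
instance (state : List Int) : Decidable (Pre_legal state) := by unfold Pre_legal; infer_instance
def pvWitness_legal : List Int := [0, 1, 1, 2, 2]

def Spec_legal (state : List Int) (out : Bool) : Prop := out = legal_alt state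
instance (state : List Int) (out : Bool) : Decidable (Spec_legal state out) := by unfold Spec_legal; infer_instance

-- ===== CLAIM (what is proved, stated in full; the proofs are below) =====
def Claim_equal_legal : Prop := ∀ (state : List Int), Dom_legal state → Pre_legal state → Spec_legal state (legal state)

-- ===== LEMMAS AND PROOFS =====

-- chip on floor state[2k+1], generator of the same element on state[2k+2]
def cIdx (state : List Int) (k : Nat) : Int := state.getD (2*k+1) 0
def gIdx (state : List Int) (k : Nat) : Int := state.getD (2*k+2) 0

lemma legal_char (state : List Int) (m : Nat) (h : state.length = 2*m+1) :
    legal state =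
      (PySem.Set.inter (PySem.Set.ofList ((List.range m).map (gIdx state)))
        (PySem.Set.ofList (((List.range m).filter
            (fun k => decide (cIdx state k ≠ gIdx state k))).map (cIdx state)))).isEmpty := by
  have hrange : PySem.List.pyRange 1 (state.length : Int) 2
      = (List.range m).map (fun k : Nat => 1 + 2*(k:Int)) := by
    rw [PySem.List.pyRange_of_pos 1 _ (by norm_num : (0:Int) < 2)]
    congr 1
    rw [h]; push_cast
    have h2 : (2*(m:Int)+1-1+2-1) = 1 + (m:Int)*2 := by ring
    have hcnt : ((2*(m:Int)+1-1+2-1)/2).toNat = m := by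
      rw [h2, Int.add_mul_ediv_right _ _ (by norm_num : (2:Int) ≠ 0)]
      norm_num
    split_ifs with h1
    · rw [hcnt]
    · have hm : m = 0 := by omega
      simp [hm]
  have hc : ∀ k : Nat, PySem.List.pyGetD state (1 + 2*(k:Int)) 0 = cIdx state k := by
    intro k
    have hi : (1 + 2*(k:Int)) = ((2*k+1 : Nat) : Int) := by push_cast; ring
    rw [hi, PySem.List.pyGetD_natCast]; rfl
  have hg : ∀ k : Nat, PySem.List.pyGetD state (1 + 2*(k:Int) + 1) 0 = gIdx state k := by
    intro k
    have hi : (1 + 2*(k:Int) + 1) = ((2*k+2 : Nat) : Int) := by push_cast; ring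
    rw [hi, PySem.List.pyGetD_natCast]; rfl
  simp only [legal, hrange, List.foldl_map, hc, hg]
  rw [PySem.List.foldl_prod_mk
      (f := fun (s : PySem.Set Int) (k : Nat) =>
        if cIdx state k ≠ gIdx state k then PySem.Set.add s (cIdx state k) else s)
      (g := fun (s : PySem.Set Int) (k : Nat) => PySem.Set.add s (gIdx state k))]
  rw [PySem.List.foldl_ite_eq_foldl_filter]
  rw [PySem.Set.ofList_eq_foldl, PySem.Set.ofList_eq_foldl, List.foldl_map, List.foldl_map]
  rfl

lemma legal_alt_char (state : List Int) (m : Nat) (h : state.length = 2*m+1) :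
    legal_alt state =
      (List.range m).all (fun k =>
        !(decide (cIdx state k ≠ gIdx state k) &&
          (List.range m).any (fun j => gIdx state j == cIdx state k))) := by
  have hrange : PySem.List.pyRange 1 (state.length : Int) 2
      = (List.range m).map (fun k : Nat => 1 + 2*(k:Int)) := by
    rw [PySem.List.pyRange_of_pos 1 _ (by norm_num : (0:Int) < 2)]
    congr 1
    rw [h]; push_cast
    have h2 : (2*(m:Int)+1-1+2-1) = 1 + (m:Int)*2 := by ring
    have hcnt : ((2*(m:Int)+1-1+2-1)/2).toNat = m := by
      rw [h2, Int.add_mul_ediv_right _ _ (by norm_num : (2:Int) ≠ 0)]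
      norm_num
    split_ifs with h1
    · rw [hcnt]
    · have hm : m = 0 := by omega
      simp [hm]
  have hrange2 : PySem.List.pyRange 2 (state.length : Int) 2
      = (List.range m).map (fun k : Nat => 2 + 2*(k:Int)) := by
    rw [PySem.List.pyRange_of_pos 2 _ (by norm_num : (0:Int) < 2)]
    congr 1
    rw [h]; push_cast
    have h2 : (2*(m:Int)+1-2+2-1) = 0 + (m:Int)*2 := by ring
    have hcnt : ((2*(m:Int)+1-2+2-1)/2).toNat = m := by
      rw [h2, Int.add_mul_ediv_right _ _ (by norm_num : (2:Int) ≠ 0)]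
      norm_num
    split_ifs with h1
    · rw [hcnt]
    · have hm : m = 0 := by omega
      simp [hm]
  have hc : ∀ k : Nat, PySem.List.pyGetD state (1 + 2*(k:Int)) 0 = cIdx state k := by
    intro k
    have hi : (1 + 2*(k:Int)) = ((2*k+1 : Nat) : Int) := by push_cast; ring
    rw [hi, PySem.List.pyGetD_natCast]; rfl
  have hg : ∀ k : Nat, PySem.List.pyGetD state (1 + 2*(k:Int) + 1) 0 = gIdx state k := by
    intro k
    have hi : (1 + 2*(k:Int) + 1) = ((2*k+2 : Nat) : Int) := by push_cast; ring
    rw [hi, PySem.List.pyGetD_natCast]; rfl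
  have hg2 : ∀ j : Nat, PySem.List.pyGetD state (2 + 2*(j:Int)) 0 = gIdx state j := by
    intro j
    have hi : (2 + 2*(j:Int)) = ((2*j+2 : Nat) : Int) := by push_cast; ring
    rw [hi, PySem.List.pyGetD_natCast]; rfl
  simp only [legal_alt, hrange, hrange2, List.all_map, List.any_map, Function.comp_def, hc, hg, hg2]

lemma chars_agree (state : List Int) (m : Nat) :
    (PySem.Set.inter (PySem.Set.ofList ((List.range m).map (gIdx state)))
        (PySem.Set.ofList (((List.range m).filter
            (fun k => decide (cIdx state k ≠ gIdx state k))).map (cIdx state)))).isEmpty =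
      (List.range m).all (fun k =>
        !(decide (cIdx state k ≠ gIdx state k) &&
          (List.range m).any (fun j => gIdx state j == cIdx state k))) := by
  rw [Bool.eq_iff_iff, List.isEmpty_iff, List.eq_nil_iff_forall_not_mem, List.all_eq_true]
  constructor
  · intro h k hk
    by_cases hceq : cIdx state k = gIdx state k
    · simp [hceq]
    · have hnog : ¬ ∃ j ∈ List.range m, gIdx state j = cIdx state k := by
        rintro ⟨j, hj, hjg⟩
        exact h (cIdx state k) (by
          rw [PySem.Set.mem_inter]
          refine ⟨?_, ?_⟩
          · rw [PySem.Set.mem_ofList]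
            exact List.mem_map.mpr ⟨j, hj, hjg⟩
          · rw [PySem.Set.mem_ofList]
            exact List.mem_map.mpr ⟨k, List.mem_filter.mpr ⟨hk, by simpa using hceq⟩, rfl⟩)
      simp only [Bool.not_eq_true', Bool.and_eq_false_iff, List.any_eq_false]
      right; intro j hj
      simpa using fun hjg => hnog ⟨j, hj, hjg⟩
  · intro h x hx
    rw [PySem.Set.mem_inter, PySem.Set.mem_ofList, PySem.Set.mem_ofList] at hx
    obtain ⟨hg, hl⟩ := hx
    obtain ⟨k, hkf, rfl⟩ := List.mem_map.mp hl
    obtain ⟨hk, hne⟩ := List.mem_filter.mp hkf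
    obtain ⟨j, hj, hjg⟩ := List.mem_map.mp hg
    have := h k hk
    simp only [Bool.not_eq_true', Bool.and_eq_false_iff, List.any_eq_false] at this
    rcases this with h1 | h2
    · simp at h1 hne; exact hne h1
    · exact absurd (by simpa using hjg) (h2 j hj)

-- ===== VERDICT =====
theorem legal_spec : Claim_equal_legal := by
  intro state _ hpre
  unfold Spec_legal
  rcases hpre with hodd | rfl
  · obtain ⟨m, hm⟩ : ∃ m, state.length = 2*m+1 := ⟨state.length / 2, by omega⟩
    rw [legal_char state m hm, legal_alt_char state m hm, chars_agree]
  · decide
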